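-- pv_equiv track=rewrite | github.com/hkLolgast/AdventOfCode2023 | day22.py | supports
-- ===== SOURCE A (Python) =====
-- def supports(block, blocks_by_z):
--     supportees = set()
--     for x, y, z in block:
--         try:
--             for block2 in blocks_by_z[z + 1]:
--                 if block != block2 and any(loc[0] == x and loc[1] == y for loc in block2):
--                     supportees.add(block2)
--                     break
--         except:
--             pass
--     return supportees
-- ===== SOURCE B (Python) =====
-- def supports(block, blocks_by_z):
--     # Index each relevant z-level once: map each (x, y) column to the FIRST
--     # candidate block (in list order, self excluded) occupying that column.
--     owner = {}
--     for _x, _y, z in block: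
--         lvl = z + 1
--         if lvl not in owner:
--             m = {}
--             for block2 in blocks_by_z.get(lvl, []):
--                 if block2 != block:
--                     for cx, cy, _cz in block2:
--                         m.setdefault((cx, cy), block2)
--             owner[lvl] = m
--     supportees = set()
--     for x, y, z in block:
--         block2 = owner[z + 1].get((x, y))
--         if block2 is not None:
--             supportees.add(block2)
--     return supportees
-- ===== Notes on version B (the rewrite author's own statement) =====
-- stated objective: alternative
-- what changed: B builds, once per distinct z-level that block touches, a dict mapping each (x,y) column to the first non-self candidate block occupying it, then resolves every cell of block with a single dict lookup, replacing A's per-cell linear scan over the candidate list and each candidate's cells.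
import Mathlib
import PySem

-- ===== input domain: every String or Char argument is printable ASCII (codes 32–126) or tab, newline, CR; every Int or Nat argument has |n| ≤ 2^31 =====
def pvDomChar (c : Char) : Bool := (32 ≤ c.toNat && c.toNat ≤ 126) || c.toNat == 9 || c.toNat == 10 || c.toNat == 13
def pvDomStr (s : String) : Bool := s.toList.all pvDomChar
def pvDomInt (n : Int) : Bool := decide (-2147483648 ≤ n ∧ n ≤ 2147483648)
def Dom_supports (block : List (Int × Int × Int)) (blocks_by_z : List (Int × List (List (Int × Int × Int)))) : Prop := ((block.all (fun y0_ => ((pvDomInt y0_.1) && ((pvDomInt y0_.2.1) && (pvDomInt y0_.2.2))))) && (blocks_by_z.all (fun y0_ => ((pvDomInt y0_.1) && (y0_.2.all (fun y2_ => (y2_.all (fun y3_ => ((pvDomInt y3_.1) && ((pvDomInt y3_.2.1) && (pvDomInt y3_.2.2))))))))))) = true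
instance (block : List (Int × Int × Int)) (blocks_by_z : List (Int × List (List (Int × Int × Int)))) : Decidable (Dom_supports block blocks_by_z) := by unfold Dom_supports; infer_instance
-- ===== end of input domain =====

-- B replaces A's per-cell scan of the candidate list (with its inner per-cell `any` scan)
-- by a per-level index built once: a dict mapping each (x, y) column to the first candidate
-- occupying it; each cell of `block` is then resolved by a single dict lookup (alternative
-- decomposition; no speed claim).

-- ===== PORT A =====
-- any(loc[0] == x and loc[1] == y for loc in block2)
def pvAnyMatch (x y : Int) (block2 : List (Int × Int × Int)) : Bool :=
  block2.any (fun loc => loc.1 == x && loc.2.1 == y)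

-- the inner 'for block2 in blocks_by_z[z+1]: … break' loop
def pvInner (block : List (Int × Int × Int)) (x y : Int)
    (cands : List (List (Int × Int × Int))) (sup : PySem.Set (List (Int × Int × Int))) :
    PySem.Set (List (Int × Int × Int)) :=
  match cands with
  | [] => sup
  | b2 :: rest =>
      if !(block == b2) && pvAnyMatch x y b2 then PySem.Set.add sup b2
      else pvInner block x y rest sup

def supports (block : List (Int × Int × Int)) (blocks_by_z : List (Int × List (List (Int × Int × Int)))) : List (List (Int × Int × Int)) :=
  block.foldl (fun sup c =>
    match PySem.Dict.get? ⟨blocks_by_z⟩ (c.2.2 + 1) with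
    | none => sup      -- KeyError, swallowed by the bare except
    | some cands => pvInner block c.1 c.2.1 cands sup) PySem.Set.empty

-- ===== PORT B =====
-- the per-level index: m.setdefault((cx, cy), block2) over candidates ≠ block
def pvOwnerFor (block : List (Int × Int × Int)) (cands : List (List (Int × Int × Int))) :
    PySem.Dict (Int × Int) (List (Int × Int × Int)) :=
  cands.foldl (fun m b2 =>
    if !(b2 == block) then
      b2.foldl (fun m c => PySem.Dict.setdefault m (c.1, c.2.1) b2) m
    else m) PySem.Dict.empty

-- first pass: owner[lvl] = index for every level block touches
def pvBuildOwner (block : List (Int × Int × Int)) (blocks_by_z : List (Int × List (List (Int × Int × Int)))) :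
    PySem.Dict Int (PySem.Dict (Int × Int) (List (Int × Int × Int))) :=
  block.foldl (fun ow c =>
    if PySem.Dict.contains ow (c.2.2 + 1) then ow
    else PySem.Dict.insert ow (c.2.2 + 1)
      (pvOwnerFor block (PySem.Dict.getD ⟨blocks_by_z⟩ (c.2.2 + 1) []))) PySem.Dict.empty

def supports_alt (block : List (Int × Int × Int)) (blocks_by_z : List (Int × List (List (Int × Int × Int)))) : List (List (Int × Int × Int)) :=
  let owner := pvBuildOwner block blocks_by_z
  -- owner[z+1] in Source B: the key is always present (pass 1 covers every z of block),
  -- so the getD default is never taken; exact.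
  block.foldl (fun sup c =>
    match PySem.Dict.get? (PySem.Dict.getD owner (c.2.2 + 1) PySem.Dict.empty) (c.1, c.2.1) with
    | some b2 => PySem.Set.add sup b2
    | none => sup) PySem.Set.empty

-- ===== PRECONDITION & SPEC =====
def Spec_supports (block : List (Int × Int × Int)) (blocks_by_z : List (Int × List (List (Int × Int × Int)))) (out : List (List (Int × Int × Int))) : Prop := out = supports_alt block blocks_by_z
instance (block : List (Int × Int × Int)) (blocks_by_z : List (Int × List (List (Int × Int × Int)))) (out : List (List (Int × Int × Int))) : Decidable (Spec_supports block blocks_by_z out) := by unfold Spec_supports; infer_instance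

-- ===== CLAIM (what is proved, stated in full; the proofs are below) =====
def Claim_equal_supports : Prop := ∀ (block : List (Int × Int × Int)) (blocks_by_z : List (Int × List (List (Int × Int × Int)))), Dom_supports block blocks_by_z → Spec_supports block blocks_by_z (supports block blocks_by_z)

-- ===== LEMMAS AND PROOFS =====

-- the first candidate ≠ block whose columns contain (x, y) — what A's break selects
def pvFirst (block : List (Int × Int × Int)) (x y : Int)
    (cands : List (List (Int × Int × Int))) : Option (List (Int × Int × Int)) :=
  match cands with
  | [] => none
  | b2 :: rest =>
      if !(block == b2) && pvAnyMatch x y b2 then some b2 else pvFirst block x y rest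

theorem pvInner_eq_first (block : List (Int × Int × Int)) (x y : Int)
    (cands : List (List (Int × Int × Int))) (sup : PySem.Set (List (Int × Int × Int))) :
    pvInner block x y cands sup =
      match pvFirst block x y cands with
      | some b2 => PySem.Set.add sup b2
      | none => sup := by
  induction cands with
  | nil => rfl
  | cons b2 rest ih =>
      simp only [pvInner, pvFirst]
      split_ifs with h <;> simp [ih]

theorem pvSetdefault_fold_get? (cells : List (Int × Int × Int))
    (v : List (Int × Int × Int)) (m : PySem.Dict (Int × Int) (List (Int × Int × Int)))
    (x y : Int) :
    PySem.Dict.get? (cells.foldl (fun m c => PySem.Dict.setdefault m (c.1, c.2.1) v) m) (x, y)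
      = (PySem.Dict.get? m (x, y)).or (if pvAnyMatch x y cells then some v else none) := by
  induction cells generalizing m with
  | nil => simp [pvAnyMatch]
  | cons c rest ih =>
      simp only [List.foldl_cons, ih]
      by_cases h : (x, y) = (c.1, c.2.1)
      · have hx : c.1 == x ∧ c.2.1 == y := by
          constructor <;> simp [Prod.ext_iff] at h <;> simp [h.1, h.2]
        rw [h, PySem.Dict.get?_setdefault_self]
        cases hm : PySem.Dict.get? m (c.1, c.2.1) <;>
          simp [pvAnyMatch, hx.1, hx.2, Option.or]
      · rw [PySem.Dict.get?_setdefault_of_ne _ _ h]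
        have hne : (c.1 == x && c.2.1 == y) = false := by
          apply Bool.eq_false_iff.mpr
          intro hc
          simp only [Bool.and_eq_true, beq_iff_eq] at hc
          exact h (by simp [hc.1.symm, hc.2.symm])
        simp only [pvAnyMatch, List.any_cons, hne, Bool.false_or]
        rfl

theorem pvOwnerFor_fold_get? (block : List (Int × Int × Int)) (x y : Int)
    (cands : List (List (Int × Int × Int)))
    (m : PySem.Dict (Int × Int) (List (Int × Int × Int))) :
    PySem.Dict.get?
      (cands.foldl (fun m b2 =>
        if !(b2 == block) then
          b2.foldl (fun m c => PySem.Dict.setdefault m (c.1, c.2.1) b2) m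
        else m) m) (x, y)
      = (PySem.Dict.get? m (x, y)).or (pvFirst block x y cands) := by
  induction cands generalizing m with
  | nil => simp [pvFirst]
  | cons b2 rest ih =>
      rw [List.foldl_cons]
      by_cases hb : b2 = block
      · subst hb
        simp only [pvFirst, beq_self_eq_true, Bool.not_true, Bool.false_and,
          Bool.false_eq_true, if_false]
        exact ih m
      · have hbb : (!(b2 == block)) = true := by simp [hb]
        have hblk : (!(block == b2)) = true := by simp [Ne.symm hb]
        rw [if_pos hbb, ih, pvSetdefault_fold_get?, pvFirst]
        cases hm : pvAnyMatch x y b2 <;>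
          cases hg : PySem.Dict.get? m (x, y) <;>
            simp [hblk]

theorem pvOwnerFor_get? (block : List (Int × Int × Int)) (x y : Int)
    (cands : List (List (Int × Int × Int))) :
    PySem.Dict.get? (pvOwnerFor block cands) (x, y) = pvFirst block x y cands := by
  unfold pvOwnerFor
  rw [pvOwnerFor_fold_get?]
  simp

-- abbreviation used only in the proofs: the index B builds for level lvl
def pvF (block : List (Int × Int × Int)) (blocks_by_z : List (Int × List (List (Int × Int × Int)))) (lvl : Int) :
    PySem.Dict (Int × Int) (List (Int × Int × Int)) :=
  pvOwnerFor block (PySem.Dict.getD ⟨blocks_by_z⟩ lvl [])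

theorem pvBuildOwner_fold_inv (block : List (Int × Int × Int))
    (blocks_by_z : List (Int × List (List (Int × Int × Int))))
    (cs : List (Int × Int × Int))
    (ow : PySem.Dict Int (PySem.Dict (Int × Int) (List (Int × Int × Int))))
    (hinv : ∀ lvl, PySem.Dict.get? ow lvl = none ∨ PySem.Dict.get? ow lvl = some (pvF block blocks_by_z lvl)) :
    ∀ lvl,
      PySem.Dict.get?
        (cs.foldl (fun ow c =>
          if PySem.Dict.contains ow (c.2.2 + 1) then ow
          else PySem.Dict.insert ow (c.2.2 + 1)
            (pvOwnerFor block (PySem.Dict.getD ⟨blocks_by_z⟩ (c.2.2 + 1) []))) ow) lvl = none ∨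
      PySem.Dict.get?
        (cs.foldl (fun ow c =>
          if PySem.Dict.contains ow (c.2.2 + 1) then ow
          else PySem.Dict.insert ow (c.2.2 + 1)
            (pvOwnerFor block (PySem.Dict.getD ⟨blocks_by_z⟩ (c.2.2 + 1) []))) ow) lvl = some (pvF block blocks_by_z lvl) := by
  induction cs generalizing ow with
  | nil => exact hinv
  | cons c rest ih =>
      intro lvl
      simp only [List.foldl_cons]
      apply ih
      intro l
      by_cases hc : PySem.Dict.contains ow (c.2.2 + 1)
      · simp only [hc, if_true]; exact hinv l
      · simp only [hc, if_false, Bool.false_eq_true]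
        by_cases hl : l = c.2.2 + 1
        · subst hl
          right
          rw [PySem.Dict.get?_insert_self]
          rfl
        · rw [PySem.Dict.get?_insert_of_ne _ _ hl]
          exact hinv l

theorem pvBuildOwner_fold_isSome (block : List (Int × Int × Int))
    (blocks_by_z : List (Int × List (List (Int × Int × Int))))
    (cs : List (Int × Int × Int))
    (ow : PySem.Dict Int (PySem.Dict (Int × Int) (List (Int × Int × Int))))
    (c : Int × Int × Int) (hc : c ∈ cs) :
    (PySem.Dict.get?
      (cs.foldl (fun ow c =>
        if PySem.Dict.contains ow (c.2.2 + 1) then ow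
        else PySem.Dict.insert ow (c.2.2 + 1)
          (pvOwnerFor block (PySem.Dict.getD ⟨blocks_by_z⟩ (c.2.2 + 1) []))) ow) (c.2.2 + 1)).isSome := by
  -- monotone step: once a level is present it stays present
  have mono : ∀ (cs' : List (Int × Int × Int)) (ow' : PySem.Dict Int (PySem.Dict (Int × Int) (List (Int × Int × Int)))) (l : Int),
      (PySem.Dict.get? ow' l).isSome →
      (PySem.Dict.get?
        (cs'.foldl (fun ow c =>
          if PySem.Dict.contains ow (c.2.2 + 1) then ow
          else PySem.Dict.insert ow (c.2.2 + 1)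
            (pvOwnerFor block (PySem.Dict.getD ⟨blocks_by_z⟩ (c.2.2 + 1) []))) ow') l).isSome := by
    intro cs' ow' l h
    induction cs' generalizing ow' with
    | nil => exact h
    | cons d rest ih =>
        simp only [List.foldl_cons]
        apply ih
        by_cases hc' : PySem.Dict.contains ow' (d.2.2 + 1)
        · simpa [hc']
        · simp only [hc', if_false, Bool.false_eq_true]
          by_cases hl : l = d.2.2 + 1
          · subst hl; rw [PySem.Dict.get?_insert_self]; rfl
          · rw [PySem.Dict.get?_insert_of_ne _ _ hl]; exact h
  induction cs generalizing ow with
  | nil => cases hc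
  | cons d rest ih =>
      simp only [List.foldl_cons]
      rcases List.mem_cons.mp hc with h | h
      · subst h
        apply mono
        by_cases hc' : PySem.Dict.contains ow (c.2.2 + 1)
        · simp only [hc', if_true]
          rw [PySem.Dict.contains_eq_isSome_get?] at hc'
          exact hc'
        · simp only [hc', if_false, Bool.false_eq_true, PySem.Dict.get?_insert_self]
          rfl
      · exact ih _ h

theorem pvBuildOwner_get? (block : List (Int × Int × Int))
    (blocks_by_z : List (Int × List (List (Int × Int × Int))))
    (c : Int × Int × Int) (hc : c ∈ block) :
    PySem.Dict.get? (pvBuildOwner block blocks_by_z) (c.2.2 + 1)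
      = some (pvF block blocks_by_z (c.2.2 + 1)) := by
  have h1 := pvBuildOwner_fold_inv block blocks_by_z block PySem.Dict.empty
    (fun lvl => Or.inl (by simp)) (c.2.2 + 1)
  have h2 := pvBuildOwner_fold_isSome block blocks_by_z block PySem.Dict.empty c hc
  unfold pvBuildOwner
  rcases h1 with h | h
  · rw [h] at h2; simp at h2
  · exact h

theorem supports_fold_eq (block : List (Int × Int × Int))
    (blocks_by_z : List (Int × List (List (Int × Int × Int))))
    (cs : List (Int × Int × Int)) (hcs : ∀ c ∈ cs, c ∈ block)
    (sup : PySem.Set (List (Int × Int × Int))) :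
    cs.foldl (fun sup c =>
      match PySem.Dict.get? ⟨blocks_by_z⟩ (c.2.2 + 1) with
      | none => sup
      | some cands => pvInner block c.1 c.2.1 cands sup) sup =
    cs.foldl (fun sup c =>
      match PySem.Dict.get? (PySem.Dict.getD (pvBuildOwner block blocks_by_z) (c.2.2 + 1) PySem.Dict.empty) (c.1, c.2.1) with
      | some b2 => PySem.Set.add sup b2
      | none => sup) sup := by
  induction cs generalizing sup with
  | nil => rfl
  | cons c rest ih =>
      simp only [List.foldl_cons]
      have hmem := hcs c (List.mem_cons_self ..)
      have howner : PySem.Dict.getD (pvBuildOwner block blocks_by_z) (c.2.2 + 1) PySem.Dict.empty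
          = pvF block blocks_by_z (c.2.2 + 1) := by
        rw [PySem.Dict.getD_eq_get?_getD, pvBuildOwner_get? block blocks_by_z c hmem]
        rfl
      have hstep : (match PySem.Dict.get? ⟨blocks_by_z⟩ (c.2.2 + 1) with
          | none => sup
          | some cands => pvInner block c.1 c.2.1 cands sup) =
          (match PySem.Dict.get? (PySem.Dict.getD (pvBuildOwner block blocks_by_z) (c.2.2 + 1) PySem.Dict.empty) (c.1, c.2.1) with
          | some b2 => PySem.Set.add sup b2
          | none => sup) := by
        rw [howner]
        unfold pvF
        rw [pvOwnerFor_get?, PySem.Dict.getD_eq_get?_getD]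
        cases hbz : PySem.Dict.get? ⟨blocks_by_z⟩ (c.2.2 + 1) with
        | none => simp [pvFirst]
        | some cands => simp [pvInner_eq_first]
      rw [hstep]
      exact ih (fun d hd => hcs d (List.mem_cons_of_mem _ hd)) _

-- ===== VERDICT (by name: the statement is the Claim_ definition above) =====
theorem supports_spec : Claim_equal_supports := by
  intro block blocks_by_z _
  unfold Spec_supports supports supports_alt
  exact supports_fold_eq block blocks_by_z block (fun _ h => h) PySem.Set.empty
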